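-- pv_equiv track=rewrite | github.com/kemtls/KEMTLS-TLS13Tamarin | src/kemtls/lemmas/oracles/ku_rms.py | order_actions
-- ===== SOURCE A (Python) =====
-- from typing import Iterator, List
--
-- def order_actions(lines: List[str], lemma: str, *args) -> Iterator[str]:
--     if lemma != "ku_rms":
--         return
--
--
--     p1: List[str] = []
--     tail: List[str] = []
--     for line in lines:
--         num: str = line.split(':')[0]
--         if "h(messages)" in line and "RevealPSK" not in line and  "RRMS" not in line:
--             p1.append(num)
--         else:
--             tail.append(num)
--
--     for num in p1 + tail:
--         yield num
-- ===== SOURCE B (Python) =====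
-- def order_actions(lines, lemma, *args):
--     if lemma != "ku_rms":
--         return
--
--     def key(line):
--         return 0 if ("h(messages)" in line and "RevealPSK" not in line
--                      and "RRMS" not in line) else 1
--
--     for line in sorted(lines, key=key):
--         yield line.split(':')[0]
-- ===== Notes on version B (the rewrite author's own statement) =====
-- stated objective: simpler
-- what changed: Replaces the explicit two-accumulator partition (p1/tail lists rebuilt then concatenated) with one stable sort of the lines by a 0/1 key followed by a single map extracting the number; stability of sorted gives the same within-group order.
import Mathlib
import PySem

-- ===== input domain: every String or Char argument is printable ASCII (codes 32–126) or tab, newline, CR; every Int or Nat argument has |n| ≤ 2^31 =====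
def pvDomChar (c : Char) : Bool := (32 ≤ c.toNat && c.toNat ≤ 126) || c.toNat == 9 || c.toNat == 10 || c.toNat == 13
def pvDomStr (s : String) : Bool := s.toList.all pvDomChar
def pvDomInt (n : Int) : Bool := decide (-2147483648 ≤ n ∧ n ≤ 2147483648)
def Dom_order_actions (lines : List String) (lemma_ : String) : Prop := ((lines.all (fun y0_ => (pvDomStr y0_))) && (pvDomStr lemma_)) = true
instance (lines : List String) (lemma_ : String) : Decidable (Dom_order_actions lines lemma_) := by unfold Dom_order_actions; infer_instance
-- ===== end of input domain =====

-- B replaces A's two-accumulator partition by a stable sort on a 0/1 key followed by a map; simpler, same values.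


-- shared by both Pythons: line.split(':')[0]  (split(':') is never empty, so [0] is the head — exact)
def pvNum (line : String) : String := ((PySem.Str.split? line ":").getD []).headD ""

-- ===== PORT A =====
def order_actions (lines : List String) (lemma_ : String) : List String :=
  if lemma_ ≠ "ku_rms" then []
  else
    let st := lines.foldl
      (fun (acc : List String × List String) line =>
        let num := pvNum line
        if PySem.Str.isIn "h(messages)" line && !PySem.Str.isIn "RevealPSK" line
            && !PySem.Str.isIn "RRMS" line then
          (acc.1 ++ [num], acc.2)
        else
          (acc.1, acc.2 ++ [num]))
      ([], [])
    st.1 ++ st.2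

-- ===== PORT B =====
-- B's key(line): 0 for the first group, 1 otherwise
def pvKey (line : String) : Int :=
  if PySem.Str.isIn "h(messages)" line && !PySem.Str.isIn "RevealPSK" line
      && !PySem.Str.isIn "RRMS" line then 0 else 1

def order_actions_alt (lines : List String) (lemma_ : String) : List String :=
  if lemma_ ≠ "ku_rms" then []
  else (PySem.List.sorted lines pvKey false).map pvNum

-- ===== PRECONDITION & SPEC =====
def Spec_order_actions (lines : List String) (lemma_ : String) (out : List String) : Prop := out = order_actions_alt lines lemma_
instance (lines : List String) (lemma_ : String) (out : List String) : Decidable (Spec_order_actions lines lemma_ out) := by unfold Spec_order_actions; infer_instance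

-- ===== CLAIM (what is proved, stated in full; the proofs are below) =====
def Claim_equal_order_actions : Prop := ∀ (lines : List String) (lemma_ : String), Dom_order_actions lines lemma_ → Spec_order_actions lines lemma_ (order_actions lines lemma_)

-- ===== LEMMAS AND PROOFS =====

-- the partition predicate both programs test
def pvPred (line : String) : Bool :=
  PySem.Str.isIn "h(messages)" line && !PySem.Str.isIn "RevealPSK" line
    && !PySem.Str.isIn "RRMS" line

theorem pvKey_eq (l : String) : pvKey l = if pvPred l then 0 else 1 := rfl

-- inserting into a "true block ++ false block" list keeps the shape (stability)
theorem insert01 (x : String) (A B : List String)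
    (hA : ∀ a ∈ A, pvPred a = true) (hB : ∀ b ∈ B, pvPred b = false) :
    PySem.List.insertBy (fun a b => decide (pvKey a < pvKey b)) x (A ++ B)
      = if pvPred x then A ++ x :: B else A ++ B ++ [x] := by
  induction A with
  | cons a A ih =>
    have ha := hA a (List.mem_cons_self ..)
    have hlt : decide (pvKey x < pvKey a) = false := by
      cases h : pvPred x <;> simp [pvKey_eq, ha, h]
    have ihh := ih (fun a h => hA a (List.mem_cons_of_mem _ h))
    simp only [List.cons_append, PySem.List.insertBy, hlt, Bool.false_eq_true, if_false, ihh]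
    cases h : pvPred x <;> simp
  | nil =>
    simp only [List.nil_append]
    induction B with
    | nil => cases h : pvPred x <;> simp [PySem.List.insertBy]
    | cons b B ihb =>
      have hb := hB b (List.mem_cons_self ..)
      have hlt : decide (pvKey x < pvKey b) = pvPred x := by
        cases h : pvPred x <;> simp [pvKey_eq, hb, h]
      have ihh := ihb (fun b h => hB b (List.mem_cons_of_mem _ h))
      simp only [PySem.List.insertBy, hlt, ihh]
      cases h : pvPred x
      · simp
      · simp

-- the insertion-sort fold on a 0/1 key is the partition
theorem fold_insert_partition (lines A B : List String)
    (hA : ∀ a ∈ A, pvPred a = true) (hB : ∀ b ∈ B, pvPred b = false) :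
    List.foldl (fun acc x => PySem.List.insertBy (fun a b => decide (pvKey a < pvKey b)) x acc)
        (A ++ B) lines
      = (A ++ lines.filter pvPred) ++ (B ++ lines.filter (fun l => !pvPred l)) := by
  induction lines generalizing A B with
  | nil => simp
  | cons l ls ih =>
    simp only [List.foldl_cons, insert01 l A B hA hB]
    cases h : pvPred l with
    | true =>
      have hA' : ∀ a ∈ A ++ [l], pvPred a = true := by
        intro a ha
        rcases List.mem_append.1 ha with h' | h'
        · exact hA a h'
        · simp only [List.mem_singleton] at h'; exact h' ▸ h
      have := ih (A ++ [l]) B hA' hB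
      simp only [if_true, List.filter_cons, h]
      rw [show A ++ l :: B = (A ++ [l]) ++ B by simp]
      rw [this]; simp
    | false =>
      have hB' : ∀ b ∈ B ++ [l], pvPred b = false := by
        intro b hb
        rcases List.mem_append.1 hb with h' | h'
        · exact hB b h'
        · simp only [List.mem_singleton] at h'; exact h' ▸ h
      have := ih A (B ++ [l]) hA hB'
      simp only [Bool.false_eq_true, if_false, List.filter_cons, h]
      rw [show A ++ B ++ [l] = A ++ (B ++ [l]) by simp]
      rw [this]; simp

-- A's fold is the same partition, with pvNum applied on the way
theorem foldA_partition (lines P T : List String) :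
    List.foldl
      (fun (acc : List String × List String) line =>
        let num := pvNum line
        if PySem.Str.isIn "h(messages)" line && !PySem.Str.isIn "RevealPSK" line
            && !PySem.Str.isIn "RRMS" line then
          (acc.1 ++ [num], acc.2)
        else
          (acc.1, acc.2 ++ [num]))
      (P, T) lines
      = (P ++ (lines.filter pvPred).map pvNum, T ++ (lines.filter (fun l => !pvPred l)).map pvNum) := by
  induction lines generalizing P T with
  | nil => simp
  | cons l ls ih =>
    rw [List.foldl_cons]
    have hstep : (let num := pvNum l
        if PySem.Str.isIn "h(messages)" l && !PySem.Str.isIn "RevealPSK" l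
            && !PySem.Str.isIn "RRMS" l then
          ((P, T).1 ++ [num], (P, T).2)
        else
          ((P, T).1, (P, T).2 ++ [num]))
        = if pvPred l then (P ++ [pvNum l], T) else (P, T ++ [pvNum l]) := rfl
    rw [hstep]
    cases h : pvPred l with
    | true => simp only [if_true, ih, List.filter_cons, h, List.map_cons]; simp
    | false => simp only [Bool.false_eq_true, if_false, ih, List.filter_cons, h]; simp

-- ===== VERDICT (by name: the statement is the Claim_ definition above) =====
theorem order_actions_spec : Claim_equal_order_actions := by
  intro lines lemma_ _
  unfold Spec_order_actions order_actions order_actions_alt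
  by_cases h : lemma_ ≠ "ku_rms"
  · simp [h]
  · simp only [h, if_false]
    rw [PySem.List.sorted_eq_foldl_insertBy]
    have hs := fold_insert_partition lines [] [] (by simp) (by simp)
    simp only [List.nil_append] at hs
    rw [hs, foldA_partition lines [] []]
    simp
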